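-- pv_equiv track=rewrite | github.com/MeGaFOne0912/MonitorLogPY | MonitorLogs2.0.py | detecaodexploracaoderotassensiveis
-- ===== SOURCE A (Python) =====
-- def detecaodexploracaoderotassensiveis(logs):
--     rotas_sensiveis = ['/admin', '/private', '/settings']
--     eventos = 0
--     eventos_malsucedidos = 0
--     for log in logs:
--         if any(rota in log for rota in rotas_sensiveis):
--             eventos += 1
--             if '403' in log or '404' in log:
--                 eventos_malsucedidos += 1
--                 return {"total_exploracoes": eventos, "total_malsucedidos": eventos_malsucedidos}
-- ===== SOURCE B (Python) =====
-- def detecaodexploracaoderotassensiveis(logs):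
--     rotas_sensiveis = ['/admin', '/private', '/settings']
--
--     def sensivel(log):
--         return any(rota in log for rota in rotas_sensiveis)
--
--     def malsucedido(log):
--         return '403' in log or '404' in log
--
--     for i, log in enumerate(logs):
--         if sensivel(log) and malsucedido(log):
--             total = sum(1 for l in logs[:i + 1] if sensivel(l))
--             return {"total_exploracoes": total, "total_malsucedidos": 1}
--     return None
-- ===== Notes on version B (the rewrite author's own statement) =====
-- stated objective: alternative
-- what changed: B splits A's single fused counting pass into two phases: enumerate to locate the index of the first sensitive-and-failed log, then count sensitive logs in the prefix logs[:i+1]; A maintains a running counter and returns mid-loop.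
import Mathlib
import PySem

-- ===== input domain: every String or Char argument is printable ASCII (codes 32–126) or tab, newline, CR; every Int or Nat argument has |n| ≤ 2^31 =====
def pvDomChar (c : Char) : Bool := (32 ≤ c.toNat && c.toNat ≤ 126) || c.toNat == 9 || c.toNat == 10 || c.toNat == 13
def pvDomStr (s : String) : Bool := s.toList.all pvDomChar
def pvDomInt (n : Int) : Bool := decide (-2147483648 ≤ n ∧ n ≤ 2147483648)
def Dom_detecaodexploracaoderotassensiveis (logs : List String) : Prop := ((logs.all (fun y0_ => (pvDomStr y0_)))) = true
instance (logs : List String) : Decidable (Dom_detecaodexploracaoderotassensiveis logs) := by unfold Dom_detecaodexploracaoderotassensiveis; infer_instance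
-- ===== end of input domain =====

-- B replaces A's fused running-counter loop by a locate-then-prefix-count decomposition (objective: alternative).

-- ===== PORT A =====
-- A's loop: running counters, return inside the loop on the first sensitive+failed log.
def pvA_go (logs : List String) (eventos : Int) : Option (List (String × Int)) :=
  match logs with
  | [] => none
  | log :: rest =>
    if (["/admin", "/private", "/settings"].any (fun rota => PySem.Str.isIn rota log)) then
      let eventos' := eventos + 1
      if PySem.Str.isIn "403" log || PySem.Str.isIn "404" log then
        some [("total_exploracoes", eventos'), ("total_malsucedidos", 1)]
      else pvA_go rest eventos'
    else pvA_go rest eventos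

def detecaodexploracaoderotassensiveis (logs : List String) : Option (List (String × Int)) :=
  pvA_go logs 0

-- ===== PORT B =====
def pvSensivel (log : String) : Bool :=
  ["/admin", "/private", "/settings"].any (fun rota => PySem.Str.isIn rota log)

def pvMalsucedido (log : String) : Bool :=
  PySem.Str.isIn "403" log || PySem.Str.isIn "404" log

-- B's locate phase over enumerate(logs); on a hit, count sensitive logs in logs[:i+1].
def pvB_find (pares : List (Int × String)) (logs : List String) : Option (List (String × Int)) :=
  match pares with
  | [] => none
  | (i, log) :: rest =>
    if pvSensivel log && pvMalsucedido log then
      some [("total_exploracoes",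
             (((PySem.List.slice logs none (some (i + 1))).countP (fun l => pvSensivel l)) : Int)),
            ("total_malsucedidos", 1)]
    else pvB_find rest logs

def detecaodexploracaoderotassensiveis_alt (logs : List String) : Option (List (String × Int)) :=
  pvB_find (PySem.List.enumerate logs 0) logs

-- ===== PRECONDITION & SPEC =====
def Spec_detecaodexploracaoderotassensiveis (logs : List String) (out : Option (List (String × Int))) : Prop := out = detecaodexploracaoderotassensiveis_alt logs
instance (logs : List String) (out : Option (List (String × Int))) : Decidable (Spec_detecaodexploracaoderotassensiveis logs out) := by unfold Spec_detecaodexploracaoderotassensiveis; infer_instance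

-- ===== CLAIM (what is proved, stated in full; the proofs are below) =====
def Claim_equal_detecaodexploracaoderotassensiveis : Prop := ∀ (logs : List String), Dom_detecaodexploracaoderotassensiveis logs → Spec_detecaodexploracaoderotassensiveis logs (detecaodexploracaoderotassensiveis logs)

-- ===== LEMMAS AND PROOFS =====
lemma pvA_eq_pvB (logs p : List String) :
    pvA_go logs ((p.countP (fun l => pvSensivel l) : Nat) : Int)
      = pvB_find (PySem.List.enumerate logs (p.length : Int)) (p ++ logs) := by
  induction logs generalizing p with
  | nil => simp [pvA_go, PySem.List.enumerate_nil, pvB_find]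
  | cons log rest ih =>
    rw [PySem.List.enumerate_cons]
    simp only [pvA_go, pvB_find]
    rw [show ((["/admin", "/private", "/settings"].any fun rota => PySem.Str.isIn rota log)) = pvSensivel log from rfl,
        show ((PySem.Str.isIn "403" log || PySem.Str.isIn "404" log)) = pvMalsucedido log from rfl]
    by_cases hs : pvSensivel log
    · rw [if_pos hs]
      by_cases hf : pvMalsucedido log
      · rw [if_pos hf]
        rw [if_pos (by rw [hs, hf]; rfl : (pvSensivel log && pvMalsucedido log) = true)]
        have hcast : (p.length : Int) + 1 = ((p.length + 1 : Nat) : Int) := by push_cast; ring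
        rw [hcast, PySem.List.slice_to_natCast]
        have htake : (p ++ log :: rest).take (p.length + 1) = p ++ [log] := by
          simp [List.take_append]
        rw [htake]
        have hcount : (p ++ [log]).countP (fun l => pvSensivel l)
            = p.countP (fun l => pvSensivel l) + 1 := by
          simp [List.countP_append, hs]
        rw [hcount]
        push_cast
        ring_nf
      · rw [if_neg hf]
        rw [if_neg (by
          intro h
          exact hf ((Bool.and_eq_true _ _).mp h).2)]
        have hcount : (p.countP (fun l => pvSensivel l) : Int) + 1
            = (((p ++ [log]).countP (fun l => pvSensivel l) : Nat) : Int) := by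
          simp [List.countP_append, hs]
          try push_cast
          try ring
          try omega
        have hlen : (p.length : Int) + 1 = (((p ++ [log]).length : Nat) : Int) := by
          simp
        rw [hcount, hlen]
        simpa using ih (p ++ [log])
    · rw [if_neg hs]
      rw [if_neg (by
        intro h
        exact hs ((Bool.and_eq_true _ _).mp h).1)]
      have hcount : (p.countP (fun l => pvSensivel l) : Int)
          = (((p ++ [log]).countP (fun l => pvSensivel l) : Nat) : Int) := by
        simp [List.countP_append, hs]
      have hlen : (p.length : Int) + 1 = (((p ++ [log]).length : Nat) : Int) := by simp
      rw [hcount, hlen]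
      simpa using ih (p ++ [log])

-- ===== VERDICT (by name: the statement is the Claim_ definition above) =====
theorem detecaodexploracaoderotassensiveis_spec : Claim_equal_detecaodexploracaoderotassensiveis := by
  intro logs _
  unfold Spec_detecaodexploracaoderotassensiveis detecaodexploracaoderotassensiveis detecaodexploracaoderotassensiveis_alt
  have := pvA_eq_pvB logs []
  simpa using this
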